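-- pv_equiv track=rewrite | github.com/aaFurze/TES-Job-Scraper | src/choose_filters.py | _generate_text_list
-- ===== SOURCE A (Python) =====
-- def _generate_text_list(prompt_body: str, choices: list) -> str:
--     """
--     Used to generate a padded string for the user prompt options.
--     If a choice is too long, it will cause the following prompt (if it is on the same line) to be out of kilter compared to
--     other options.
--     """
--
--     output = prompt_body
--
--     for i, choice in enumerate(choices):
--         if i % 2 == 0:
--              output += "\n"
--         else:
--             output += "".ljust(max(40 - (len(str(choices[i - 1])) + 2 + len(str(i))), 4))
--         output += f"{i + 1}. {choice}"
--     return output + "\n"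
-- ===== SOURCE B (Python) =====
-- def _generate_text_list(prompt_body: str, choices: list) -> str:
--     output = prompt_body
--     for j in range(0, len(choices), 2):
--         output += "\n" + f"{j + 1}. {choices[j]}"
--         if j + 1 < len(choices):
--             pad = max(40 - (len(choices[j]) + 2 + len(str(j + 1))), 4)
--             output += " " * pad + f"{j + 2}. {choices[j + 1]}"
--     return output + "\n"
-- ===== Notes on version B (the rewrite author's own statement) =====
-- stated objective: alternative
-- what changed: Replaces the flat enumerate loop with its i%2 parity dispatch by a loop over rows (range(0, len, 2)) that emits a whole two-item line per step, computing the padding directly from the left item of the row.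
import Mathlib
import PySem

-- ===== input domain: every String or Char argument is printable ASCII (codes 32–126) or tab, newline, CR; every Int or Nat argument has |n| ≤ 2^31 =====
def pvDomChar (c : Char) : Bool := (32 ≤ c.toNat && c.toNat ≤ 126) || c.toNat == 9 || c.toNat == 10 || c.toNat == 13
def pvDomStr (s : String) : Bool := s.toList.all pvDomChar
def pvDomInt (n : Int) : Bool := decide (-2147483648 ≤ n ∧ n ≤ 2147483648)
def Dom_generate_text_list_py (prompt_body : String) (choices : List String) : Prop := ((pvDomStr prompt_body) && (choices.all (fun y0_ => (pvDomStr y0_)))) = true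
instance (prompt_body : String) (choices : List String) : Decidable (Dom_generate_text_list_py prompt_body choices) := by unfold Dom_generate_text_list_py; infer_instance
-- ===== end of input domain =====

-- B replaces A's flat enumerate loop with its i % 2 parity dispatch by a loop over rows
-- (range(0, len(choices), 2)) that emits a whole two-item line per step; same output, same cost.


-- ===== PORT A =====
-- "".ljust(w) with w ≥ 0 is w spaces (both Pythons only call it with w = max(…, 4) ≥ 4);
-- str() of a str is the identity, so len(str(x)) is ported as PySem.Str.len x.
def pvSpaces (w : Int) : String := String.ofList (List.replicate w.toNat ' ')

-- the body of A's 'for i, choice in enumerate(choices)' loop, over the enumerate list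
def generate_text_list_py_loop (choices : List String) : List (Int × String) → String → String
  | [], output => output
  | (i, choice) :: rest, output =>
    let output :=
      if i % 2 == 0 then output ++ "\n"
      else output ++ pvSpaces (max (40 - (PySem.Str.len (PySem.List.pyGetD choices (i - 1) "") + 2 + PySem.Str.len (PySem.Int.toStr i))) 4)
    generate_text_list_py_loop choices rest (output ++ (PySem.Int.toStr (i + 1) ++ ". " ++ choice))

def generate_text_list_py (prompt_body : String) (choices : List String) : String :=
  let output := prompt_body
  let output := generate_text_list_py_loop choices (PySem.List.enumerate choices) output
  output ++ "\n"

-- ===== PORT B =====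
-- the body of B's 'for j in range(0, len(choices), 2)' loop, over the range list
def generate_text_list_py_alt_loop (choices : List String) : List Int → String → String
  | [], output => output
  | j :: js, output =>
    let output := output ++ ("\n" ++ (PySem.Int.toStr (j + 1) ++ ". " ++ PySem.List.pyGetD choices j ""))
    let output :=
      if j + 1 < PySem.List.len choices then
        let pad := max (40 - (PySem.Str.len (PySem.List.pyGetD choices j "") + 2 + PySem.Str.len (PySem.Int.toStr (j + 1)))) 4
        output ++ (pvSpaces pad ++ (PySem.Int.toStr (j + 2) ++ ". " ++ PySem.List.pyGetD choices (j + 1) ""))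
      else output
    generate_text_list_py_alt_loop choices js output

def generate_text_list_py_alt (prompt_body : String) (choices : List String) : String :=
  let output := prompt_body
  let output := generate_text_list_py_alt_loop choices (PySem.List.pyRange 0 (PySem.List.len choices) 2) output
  output ++ "\n"

-- ===== PRECONDITION & SPEC =====
def Spec_generate_text_list_py (prompt_body : String) (choices : List String) (out : String) : Prop := out = generate_text_list_py_alt prompt_body choices
instance (prompt_body : String) (choices : List String) (out : String) : Decidable (Spec_generate_text_list_py prompt_body choices out) := by unfold Spec_generate_text_list_py; infer_instance

-- ===== CLAIM (what is proved, stated in full; the proofs are below) =====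
def Claim_equal_generate_text_list_py : Prop := ∀ (prompt_body : String) (choices : List String), Dom_generate_text_list_py prompt_body choices → Spec_generate_text_list_py prompt_body choices (generate_text_list_py prompt_body choices)

-- ===== LEMMAS AND PROOFS =====
theorem pyRange2_nil (a b : Int) (h : b ≤ a) : PySem.List.pyRange a b 2 = [] := by
  rw [PySem.List.pyRange_of_pos a b (by norm_num)]
  simp [if_neg (not_lt.mpr h)]

theorem pyRange2_cons (a b : Int) (h : a < b) : PySem.List.pyRange a b 2 = a :: PySem.List.pyRange (a + 2) b 2 := by
  rw [PySem.List.pyRange_of_pos a b (by norm_num), PySem.List.pyRange_of_pos (a + 2) b (by norm_num)]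
  have hcount : ((b - a + 2 - 1) / 2).toNat = (if a + 2 < b then ((b - (a + 2) + 2 - 1) / 2).toNat else 0) + 1 := by
    split_ifs with h2 <;> omega
  rw [if_pos h, hcount, List.range_succ_eq_map]
  simp only [List.map_cons, List.map_map]
  refine congrArg₂ _ (by simp) ?_
  apply List.map_congr_left
  intro k _
  simp [Function.comp, Nat.succ_eq_add_one]
  ring

theorem main_lemma (choices : List String) :
    ∀ (n : Nat) (rest : List String), rest.length = n →
    ∀ (i : Nat), choices.drop i = rest → i % 2 = 0 → ∀ (out : String),
      generate_text_list_py_loop choices (PySem.List.enumerate rest i) out =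
      generate_text_list_py_alt_loop choices (PySem.List.pyRange i (PySem.List.len choices) 2) out := by
  intro n
  induction n using Nat.strong_induction_on with
  | _ n ih =>
    intro rest hlen i hdrop hpar out
    have hlendrop : choices.length - i = rest.length := by
      rw [← List.length_drop, hdrop]
    match rest with
    | [] =>
      have hge : (PySem.List.len choices) ≤ (i : Int) := by
        simp at hlendrop ⊢
        have hle := List.drop_eq_nil_iff.mp hdrop
        omega
      rw [pyRange2_nil _ _ hge]
      simp [PySem.List.enumerate, generate_text_list_py_loop, generate_text_list_py_alt_loop]
    | [x] =>
      have hlt : i < choices.length := by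
        by_contra hc
        rw [List.drop_eq_nil_iff.mpr (by omega)] at hdrop
        exact absurd hdrop (by simp)
      have hlenx : choices.length = i + 1 := by
        simp at hlendrop; omega
      have hx : PySem.List.pyGetD choices (i : Int) "" = x := by
        rw [PySem.List.pyGetD_natCast]
        have : choices[i]? = some x := by
          have h0 : (choices.drop i)[0]? = some x := by rw [hdrop]; rfl
          rwa [List.getElem?_drop, Nat.add_zero] at h0
        simp [List.getD, this]
      have hcons := pyRange2_cons (i : Int) (PySem.List.len choices) (by simp [hlenx])
      rw [hcons, pyRange2_nil ((i : Int) + 2) _ (by simp [hlenx])]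
      simp only [PySem.List.enumerate_cons, PySem.List.enumerate_nil,
        generate_text_list_py_loop, generate_text_list_py_alt_loop]
      have hpareven : ((i : Int) % 2 == 0) = true := by
        simp; omega
      have hnotlt : ¬((i : Int) + 1 < PySem.List.len choices) := by simp [hlenx]
      rw [if_pos hpareven, if_neg hnotlt, hx]
      simp [String.append_assoc]
    | x :: y :: r =>
      have hle : i + 2 ≤ choices.length := by
        have hlt : i < choices.length := by
          by_contra hc
          rw [List.drop_eq_nil_iff.mpr (by omega)] at hdrop
          exact absurd hdrop (by simp)
        simp at hlendrop; omega
      have hx : PySem.List.pyGetD choices (i : Int) "" = x := by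
        rw [PySem.List.pyGetD_natCast]
        have : choices[i]? = some x := by
          have h0 : (choices.drop i)[0]? = some x := by rw [hdrop]; rfl
          rwa [List.getElem?_drop, Nat.add_zero] at h0
        simp [List.getD, this]
      have hy : PySem.List.pyGetD choices ((i : Int) + 1) "" = y := by
        have : ((i : Int) + 1) = ((i + 1 : Nat) : Int) := by push_cast; ring
        rw [this, PySem.List.pyGetD_natCast]
        have : choices[i + 1]? = some y := by
          have h0 : (choices.drop i)[1]? = some y := by rw [hdrop]; rfl
          rwa [List.getElem?_drop] at h0
        simp [List.getD, this]
      have hdrop2 : choices.drop (i + 2) = r := by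
        have h2 : List.drop 2 (List.drop i choices) = r := by rw [hdrop]; rfl
        rwa [List.drop_drop] at h2
      have hcons := pyRange2_cons (i : Int) (PySem.List.len choices) (by simp; omega)
      rw [hcons]
      simp only [PySem.List.enumerate_cons,
        generate_text_list_py_loop, generate_text_list_py_alt_loop]
      have hpareven : ((i : Int) % 2 == 0) = true := by simp; omega
      have hparodd : (((i : Int) + 1) % 2 == 0) = false := by simp; omega
      rw [if_pos hpareven, if_neg (by rw [hparodd]; simp),
        if_pos (by simp; omega : (i : Int) + 1 < PySem.List.len choices)]
      rw [show (i : Int) + 1 - 1 = (i : Int) by ring, hx, hy]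
      have hrec := ih r.length (by simp at hlen; omega) r rfl (i + 2) hdrop2 (by omega)
      have hcast : ((i + 2 : Nat) : Int) = (i : Int) + 2 := by push_cast; ring
      rw [hcast] at hrec
      rw [show (i : Int) + 1 + 1 = (i : Int) + 2 by ring, ← hrec]
      exact congrArg _ (by simp [String.append_assoc])

-- ===== VERDICT (by name: the statement is the Claim_ definition above) =====
theorem generate_text_list_py_spec : Claim_equal_generate_text_list_py := by
  intro prompt_body choices _
  unfold Spec_generate_text_list_py generate_text_list_py generate_text_list_py_alt
  simp only []
  have h := main_lemma choices choices.length choices rfl 0 rfl rfl prompt_body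
  simp only [Nat.cast_zero] at h
  rw [h]
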